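-- pv_equiv track=rewrite | github.com/BraCR10/musicPlayer-TEC-TallerProject | busqueda.py | buscarArtista
-- ===== SOURCE A (Python) =====
-- def buscarArtista(codArtista,listaArt,listaGen):
--     nombreArtista=[]
--     codGenero=[]
--     nombreGenero=0
--     for i in listaArt:
--         if i[0]==codArtista:
--             nombreArtista=i[1]
--             codGenero=i[2]
--     for i in listaGen:
--         if i[0]==codGenero:
--             nombreGenero=i[1]
--     if nombreArtista!=[] and nombreGenero!=0:
--         return nombreArtista,nombreGenero
-- ===== SOURCE B (Python) =====
-- def buscarArtista(codArtista, listaArt, listaGen):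
--     # Scan the artist list backwards and stop at the FIRST hit: the last
--     # forward match that A's break-less loop ends up keeping.  Only then
--     # scan the genre list, also backwards with early exit.
--     for a in reversed(listaArt):
--         if a[0] == codArtista:
--             for g in reversed(listaGen):
--                 if g[0] == a[2]:
--                     return a[1], g[1]
--             return None
--     return None
-- ===== Notes on version B (the rewrite author's own statement) =====
-- stated objective: alternative
-- what changed: Replaces A's two staged full passes with sentinel accumulators by nested reversed-order scans with early exit: the first hit walking backwards is A's last forward match, and the genre scan runs only after an artist is found.
import Mathlib
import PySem

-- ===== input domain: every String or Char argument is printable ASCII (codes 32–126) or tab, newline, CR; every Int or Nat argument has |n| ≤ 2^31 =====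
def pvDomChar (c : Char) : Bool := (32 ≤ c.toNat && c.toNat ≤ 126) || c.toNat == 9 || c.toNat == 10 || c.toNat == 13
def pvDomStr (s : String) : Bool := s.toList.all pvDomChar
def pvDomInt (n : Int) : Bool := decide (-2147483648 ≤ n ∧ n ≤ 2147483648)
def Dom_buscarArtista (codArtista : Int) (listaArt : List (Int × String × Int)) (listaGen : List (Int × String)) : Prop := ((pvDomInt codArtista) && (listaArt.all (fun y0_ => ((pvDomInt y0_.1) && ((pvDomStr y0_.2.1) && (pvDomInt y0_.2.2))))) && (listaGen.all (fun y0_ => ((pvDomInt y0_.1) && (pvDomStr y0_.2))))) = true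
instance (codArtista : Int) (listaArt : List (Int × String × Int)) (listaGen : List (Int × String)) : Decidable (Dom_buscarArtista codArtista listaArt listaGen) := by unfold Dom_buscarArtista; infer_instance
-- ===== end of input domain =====

-- B replaces A's two staged full passes with sentinel accumulators by nested
-- reversed-order scans with early exit (first backward hit = A's last forward
-- match); objective: alternative, same worst-case cost.

-- ===== PORT A =====
-- Python sentinels: nombreArtista=[] ↦ none, codGenero=[] ↦ none, nombreGenero=0 ↦ none
-- ('i[0]==codGenero' with codGenero=[] is False in Python: the 'none => false' branch).
def buscarArtista (codArtista : Int) (listaArt : List (Int × String × Int)) (listaGen : List (Int × String)) : Option (String × String) :=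
  let st := listaArt.foldl
    (fun (st : Option String × Option Int) i =>
      if i.1 == codArtista then (some i.2.1, some i.2.2) else st)
    (none, none)
  let nombreGenero := listaGen.foldl
    (fun (ng : Option String) i =>
      if (match st.2 with | some c => i.1 == c | none => false) then some i.2 else ng)
    none
  match st.1, nombreGenero with
  | some na, some g => some (na, g)
  | _, _ => none

-- ===== PORT B =====
-- inner reversed early-exit scan of the genre list
def pvGenScan (cod : Int) : List (Int × String) → Option String
  | [] => none
  | g :: t => if g.1 == cod then some g.2 else pvGenScan cod t

-- outer reversed early-exit scan of the artist list
def pvArtScan (codArtista : Int) (genRev : List (Int × String)) : List (Int × String × Int) → Option (String × String)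
  | [] => none
  | a :: t =>
    if a.1 == codArtista then
      match pvGenScan a.2.2 genRev with
      | some g => some (a.2.1, g)
      | none => none
    else pvArtScan codArtista genRev t

def buscarArtista_alt (codArtista : Int) (listaArt : List (Int × String × Int)) (listaGen : List (Int × String)) : Option (String × String) :=
  pvArtScan codArtista listaGen.reverse listaArt.reverse

-- ===== PRECONDITION & SPEC =====
def Spec_buscarArtista (codArtista : Int) (listaArt : List (Int × String × Int)) (listaGen : List (Int × String)) (out : Option (String × String)) : Prop := out = buscarArtista_alt codArtista listaArt listaGen
instance (codArtista : Int) (listaArt : List (Int × String × Int)) (listaGen : List (Int × String)) (out : Option (String × String)) : Decidable (Spec_buscarArtista codArtista listaArt listaGen out) := by unfold Spec_buscarArtista; infer_instance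

-- ===== CLAIM (what is proved, stated in full; the proofs are below) =====
def Claim_equal_buscarArtista : Prop := ∀ (codArtista : Int) (listaArt : List (Int × String × Int)) (listaGen : List (Int × String)), Dom_buscarArtista codArtista listaArt listaGen → Spec_buscarArtista codArtista listaArt listaGen (buscarArtista codArtista listaArt listaGen)

-- ===== LEMMAS AND PROOFS =====

-- A break-less "last match wins" scan is the find? of the reversed list.
theorem foldl_lastmatch {α β : Type} (l : List α) (p : α → Bool) (f : α → β) (init : β) :
    l.foldl (fun st a => if p a then f a else st) init =
      match l.reverse.find? p with
      | some a => f a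
      | none => init := by
  induction l generalizing init with
  | nil => simp
  | cons c t ih =>
    simp only [List.foldl_cons, List.reverse_cons, List.find?_append, ih]
    cases h : t.reverse.find? p with
    | some a => simp
    | none =>
      simp only [Option.none_or]
      by_cases hp : p c = true <;> simp [List.find?, hp]

theorem pvGenScan_eq_find? (cod : Int) (l : List (Int × String)) :
    pvGenScan cod l = (l.find? (fun g => g.1 == cod)).map (·.2) := by
  induction l with
  | nil => simp [pvGenScan]
  | cons c t ih =>
    by_cases h : (c.1 == cod) = true <;> simp [pvGenScan, List.find?, h, ih]

theorem pvArtScan_eq_find? (codArtista : Int) (genRev : List (Int × String)) (l : List (Int × String × Int)) :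
    pvArtScan codArtista genRev l =
      match l.find? (fun a => a.1 == codArtista) with
      | some a =>
        (match pvGenScan a.2.2 genRev with
         | some g => some (a.2.1, g)
         | none => none)
      | none => none := by
  induction l with
  | nil => simp [pvArtScan]
  | cons c t ih =>
    by_cases h : (c.1 == codArtista) = true <;> simp [pvArtScan, List.find?, h, ih]

-- ===== VERDICT (by name: the statement is the Claim_ definition above) =====
theorem buscarArtista_spec : Claim_equal_buscarArtista := by
  intro codArtista listaArt listaGen _
  unfold Spec_buscarArtista buscarArtista buscarArtista_alt
  simp only [foldl_lastmatch, pvArtScan_eq_find?, pvGenScan_eq_find?]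
  cases hA : listaArt.reverse.find? (fun i => i.1 == codArtista) with
  | none => simp
  | some a =>
    simp only [hA]
    cases hG : listaGen.reverse.find? (fun i => i.1 == a.2.2) with
    | none => simp
    | some g => simp
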